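-- pv_equiv track=rewrite | github.com/dinoooop/uc | api/core/utils/basic.py | special_ceil
-- ===== SOURCE A (Python) =====
-- def special_ceil(n: int) -> int:
--     breakpoints = [
--         0,
--         100,
--         1000,
--         5000,
--         10000,
--         50000,
--         100000,
--         500000,
--         1000000,
--         5000000,
--         10000000,
--     ]
--
--     # If n is smaller than or equal to the first breakpoint, return the first
--     if n <= breakpoints[0]:
--         return breakpoints[0]
--
--     # Loop to find next breakpoint >= n
--     for i, bp in enumerate(breakpoints):
--         if n == bp:
--             return bp  # exact match → return itself
--         if n < bp:
--             return bp  # first bp greater than n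
--
--     # If n is above all breakpoints → return last breakpoint
--     return breakpoints[-1]
-- ===== SOURCE B (Python) =====
-- import bisect
--
-- BREAKPOINTS = [0, 100, 1000, 5000, 10000, 50000, 100000, 500000, 1000000, 5000000, 10000000]
--
-- def special_ceil(n: int) -> int:
--     idx = bisect.bisect_left(BREAKPOINTS, n)
--     if idx == len(BREAKPOINTS):
--         return BREAKPOINTS[-1]
--     return BREAKPOINTS[idx]
-- ===== Notes on version B (the rewrite author's own statement) =====
-- stated objective: idiomatic
-- what changed: Replaces the guard-plus-linear-enumerate scan with a single bisect_left binary search over the constant breakpoint table, clamping an out-of-range index to the last breakpoint.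
import Mathlib
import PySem

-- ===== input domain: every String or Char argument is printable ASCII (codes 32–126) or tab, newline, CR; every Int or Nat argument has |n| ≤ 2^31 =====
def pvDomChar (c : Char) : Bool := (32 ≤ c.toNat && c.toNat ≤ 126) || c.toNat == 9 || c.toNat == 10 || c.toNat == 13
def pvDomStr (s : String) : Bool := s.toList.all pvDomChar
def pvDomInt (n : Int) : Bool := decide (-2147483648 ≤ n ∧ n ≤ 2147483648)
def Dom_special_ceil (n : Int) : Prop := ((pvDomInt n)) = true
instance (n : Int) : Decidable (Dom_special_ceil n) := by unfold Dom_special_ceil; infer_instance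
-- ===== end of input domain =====

-- B replaces A's linear scan over the breakpoint table with a bisect_left binary search (more idiomatic; same result).


-- ===== PORT A =====
-- the 'for i, bp in enumerate(breakpoints)' loop: returns the first bp with n == bp or n < bp, none if it falls through
def scanLoopA (n : Int) : List Int → Option Int
  | [] => none
  | bp :: rest => if n = bp then some bp else if n < bp then some bp else scanLoopA n rest

def special_ceil (n : Int) : Int :=
  let breakpoints : List Int :=
    [0, 100, 1000, 5000, 10000, 50000, 100000, 500000, 1000000, 5000000, 10000000]
  if n ≤ 0 then 0
  else
    match scanLoopA n breakpoints with
    | some bp => bp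
    | none => 10000000   -- breakpoints[-1]

-- ===== PORT B =====
def pvBreakpoints : List Int :=
  [0, 100, 1000, 5000, 10000, 50000, 100000, 500000, 1000000, 5000000, 10000000]

-- bisect.bisect_left(xs, x)'s 'while lo < hi' loop; the fuel argument is only a totality guard
-- (hi - lo steps always suffice since the interval shrinks each iteration); getD is exact here since mid < hi ≤ xs.length
def bisectLeftGo (xs : List Int) (x : Int) : Nat → Nat → Nat → Nat
  | 0, lo, _hi => lo
  | fuel + 1, lo, hi =>
    if lo < hi then
      let mid := (lo + hi) / 2
      if xs.getD mid 0 < x then bisectLeftGo xs x fuel (mid + 1) hi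
      else bisectLeftGo xs x fuel lo mid
    else lo

def bisectLeft (xs : List Int) (x : Int) (lo hi : Nat) : Nat := bisectLeftGo xs x (hi - lo) lo hi

def special_ceil_alt (n : Int) : Int :=
  let idx := bisectLeft pvBreakpoints n 0 pvBreakpoints.length
  if idx = pvBreakpoints.length then pvBreakpoints.getLast!   -- BREAKPOINTS[-1], exact: list nonempty
  else pvBreakpoints.getD idx 0                               -- exact: idx < length here

-- ===== PRECONDITION & SPEC =====
def Spec_special_ceil (n : Int) (out : Int) : Prop := out = special_ceil_alt n
instance (n : Int) (out : Int) : Decidable (Spec_special_ceil n out) := by unfold Spec_special_ceil; infer_instance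

-- ===== CLAIM (what is proved, stated in full; the proofs are below) =====
def Claim_equal_special_ceil : Prop := ∀ (n : Int), Dom_special_ceil n → Spec_special_ceil n (special_ceil n)

-- ===== LEMMAS AND PROOFS =====

lemma bl_step (xs : List Int) (x : Int) (f lo hi : Nat) (h : lo < hi) :
    bisectLeftGo xs x (f + 1) lo hi =
      if xs.getD ((lo + hi) / 2) 0 < x then bisectLeftGo xs x f ((lo + hi) / 2 + 1) hi
      else bisectLeftGo xs x f lo ((lo + hi) / 2) := by
  simp [bisectLeftGo, h]

lemma bl_stop (xs : List Int) (x : Int) (f lo hi : Nat) (h : ¬ lo < hi) :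
    bisectLeftGo xs x f lo hi = lo := by
  cases f <;> simp [bisectLeftGo, h]

lemma pvBl0 (n : Int) (h1 : n ≤ 0) : bisectLeft pvBreakpoints n 0 11 = 0 := by
  unfold bisectLeft
  show bisectLeftGo pvBreakpoints n (10 + 1) 0 11 = 0
  rw [bl_step _ _ _ _ _ (by norm_num)]
  norm_num [pvBreakpoints]
  rw [if_neg (by omega)]
  show bisectLeftGo pvBreakpoints n (9 + 1) 0 5 = 0
  rw [bl_step _ _ _ _ _ (by norm_num)]
  norm_num [pvBreakpoints]
  rw [if_neg (by omega)]
  show bisectLeftGo pvBreakpoints n (8 + 1) 0 2 = 0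
  rw [bl_step _ _ _ _ _ (by norm_num)]
  norm_num [pvBreakpoints]
  rw [if_neg (by omega)]
  show bisectLeftGo pvBreakpoints n (7 + 1) 0 1 = 0
  rw [bl_step _ _ _ _ _ (by norm_num)]
  norm_num [pvBreakpoints]
  rw [if_neg (by omega)]
  rw [bl_stop _ _ _ _ _ (by norm_num)]

lemma pvBl1 (n : Int) (h1 : (0:Int) < n) (h2 : n ≤ 100) : bisectLeft pvBreakpoints n 0 11 = 1 := by
  unfold bisectLeft
  show bisectLeftGo pvBreakpoints n (10 + 1) 0 11 = 1
  rw [bl_step _ _ _ _ _ (by norm_num)]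
  norm_num [pvBreakpoints]
  rw [if_neg (by omega)]
  show bisectLeftGo pvBreakpoints n (9 + 1) 0 5 = 1
  rw [bl_step _ _ _ _ _ (by norm_num)]
  norm_num [pvBreakpoints]
  rw [if_neg (by omega)]
  show bisectLeftGo pvBreakpoints n (8 + 1) 0 2 = 1
  rw [bl_step _ _ _ _ _ (by norm_num)]
  norm_num [pvBreakpoints]
  rw [if_neg (by omega)]
  show bisectLeftGo pvBreakpoints n (7 + 1) 0 1 = 1
  rw [bl_step _ _ _ _ _ (by norm_num)]
  norm_num [pvBreakpoints]
  rw [if_pos (by omega)]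
  rw [bl_stop _ _ _ _ _ (by norm_num)]

lemma pvBl2 (n : Int) (h1 : (100:Int) < n) (h2 : n ≤ 1000) : bisectLeft pvBreakpoints n 0 11 = 2 := by
  unfold bisectLeft
  show bisectLeftGo pvBreakpoints n (10 + 1) 0 11 = 2
  rw [bl_step _ _ _ _ _ (by norm_num)]
  norm_num [pvBreakpoints]
  rw [if_neg (by omega)]
  show bisectLeftGo pvBreakpoints n (9 + 1) 0 5 = 2
  rw [bl_step _ _ _ _ _ (by norm_num)]
  norm_num [pvBreakpoints]
  rw [if_neg (by omega)]
  show bisectLeftGo pvBreakpoints n (8 + 1) 0 2 = 2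
  rw [bl_step _ _ _ _ _ (by norm_num)]
  norm_num [pvBreakpoints]
  rw [if_pos (by omega)]
  rw [bl_stop _ _ _ _ _ (by norm_num)]

lemma pvBl3 (n : Int) (h1 : (1000:Int) < n) (h2 : n ≤ 5000) : bisectLeft pvBreakpoints n 0 11 = 3 := by
  unfold bisectLeft
  show bisectLeftGo pvBreakpoints n (10 + 1) 0 11 = 3
  rw [bl_step _ _ _ _ _ (by norm_num)]
  norm_num [pvBreakpoints]
  rw [if_neg (by omega)]
  show bisectLeftGo pvBreakpoints n (9 + 1) 0 5 = 3
  rw [bl_step _ _ _ _ _ (by norm_num)]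
  norm_num [pvBreakpoints]
  rw [if_pos (by omega)]
  show bisectLeftGo pvBreakpoints n (8 + 1) 3 5 = 3
  rw [bl_step _ _ _ _ _ (by norm_num)]
  norm_num [pvBreakpoints]
  rw [if_neg (by omega)]
  show bisectLeftGo pvBreakpoints n (7 + 1) 3 4 = 3
  rw [bl_step _ _ _ _ _ (by norm_num)]
  norm_num [pvBreakpoints]
  rw [if_neg (by omega)]
  rw [bl_stop _ _ _ _ _ (by norm_num)]

lemma pvBl4 (n : Int) (h1 : (5000:Int) < n) (h2 : n ≤ 10000) : bisectLeft pvBreakpoints n 0 11 = 4 := by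
  unfold bisectLeft
  show bisectLeftGo pvBreakpoints n (10 + 1) 0 11 = 4
  rw [bl_step _ _ _ _ _ (by norm_num)]
  norm_num [pvBreakpoints]
  rw [if_neg (by omega)]
  show bisectLeftGo pvBreakpoints n (9 + 1) 0 5 = 4
  rw [bl_step _ _ _ _ _ (by norm_num)]
  norm_num [pvBreakpoints]
  rw [if_pos (by omega)]
  show bisectLeftGo pvBreakpoints n (8 + 1) 3 5 = 4
  rw [bl_step _ _ _ _ _ (by norm_num)]
  norm_num [pvBreakpoints]
  rw [if_neg (by omega)]
  show bisectLeftGo pvBreakpoints n (7 + 1) 3 4 = 4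
  rw [bl_step _ _ _ _ _ (by norm_num)]
  norm_num [pvBreakpoints]
  rw [if_pos (by omega)]
  rw [bl_stop _ _ _ _ _ (by norm_num)]

lemma pvBl5 (n : Int) (h1 : (10000:Int) < n) (h2 : n ≤ 50000) : bisectLeft pvBreakpoints n 0 11 = 5 := by
  unfold bisectLeft
  show bisectLeftGo pvBreakpoints n (10 + 1) 0 11 = 5
  rw [bl_step _ _ _ _ _ (by norm_num)]
  norm_num [pvBreakpoints]
  rw [if_neg (by omega)]
  show bisectLeftGo pvBreakpoints n (9 + 1) 0 5 = 5
  rw [bl_step _ _ _ _ _ (by norm_num)]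
  norm_num [pvBreakpoints]
  rw [if_pos (by omega)]
  show bisectLeftGo pvBreakpoints n (8 + 1) 3 5 = 5
  rw [bl_step _ _ _ _ _ (by norm_num)]
  norm_num [pvBreakpoints]
  rw [if_pos (by omega)]
  rw [bl_stop _ _ _ _ _ (by norm_num)]

lemma pvBl6 (n : Int) (h1 : (50000:Int) < n) (h2 : n ≤ 100000) : bisectLeft pvBreakpoints n 0 11 = 6 := by
  unfold bisectLeft
  show bisectLeftGo pvBreakpoints n (10 + 1) 0 11 = 6
  rw [bl_step _ _ _ _ _ (by norm_num)]
  norm_num [pvBreakpoints]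
  rw [if_pos (by omega)]
  show bisectLeftGo pvBreakpoints n (9 + 1) 6 11 = 6
  rw [bl_step _ _ _ _ _ (by norm_num)]
  norm_num [pvBreakpoints]
  rw [if_neg (by omega)]
  show bisectLeftGo pvBreakpoints n (8 + 1) 6 8 = 6
  rw [bl_step _ _ _ _ _ (by norm_num)]
  norm_num [pvBreakpoints]
  rw [if_neg (by omega)]
  show bisectLeftGo pvBreakpoints n (7 + 1) 6 7 = 6
  rw [bl_step _ _ _ _ _ (by norm_num)]
  norm_num [pvBreakpoints]
  rw [if_neg (by omega)]
  rw [bl_stop _ _ _ _ _ (by norm_num)]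

lemma pvBl7 (n : Int) (h1 : (100000:Int) < n) (h2 : n ≤ 500000) : bisectLeft pvBreakpoints n 0 11 = 7 := by
  unfold bisectLeft
  show bisectLeftGo pvBreakpoints n (10 + 1) 0 11 = 7
  rw [bl_step _ _ _ _ _ (by norm_num)]
  norm_num [pvBreakpoints]
  rw [if_pos (by omega)]
  show bisectLeftGo pvBreakpoints n (9 + 1) 6 11 = 7
  rw [bl_step _ _ _ _ _ (by norm_num)]
  norm_num [pvBreakpoints]
  rw [if_neg (by omega)]
  show bisectLeftGo pvBreakpoints n (8 + 1) 6 8 = 7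
  rw [bl_step _ _ _ _ _ (by norm_num)]
  norm_num [pvBreakpoints]
  rw [if_neg (by omega)]
  show bisectLeftGo pvBreakpoints n (7 + 1) 6 7 = 7
  rw [bl_step _ _ _ _ _ (by norm_num)]
  norm_num [pvBreakpoints]
  rw [if_pos (by omega)]
  rw [bl_stop _ _ _ _ _ (by norm_num)]

lemma pvBl8 (n : Int) (h1 : (500000:Int) < n) (h2 : n ≤ 1000000) : bisectLeft pvBreakpoints n 0 11 = 8 := by
  unfold bisectLeft
  show bisectLeftGo pvBreakpoints n (10 + 1) 0 11 = 8
  rw [bl_step _ _ _ _ _ (by norm_num)]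
  norm_num [pvBreakpoints]
  rw [if_pos (by omega)]
  show bisectLeftGo pvBreakpoints n (9 + 1) 6 11 = 8
  rw [bl_step _ _ _ _ _ (by norm_num)]
  norm_num [pvBreakpoints]
  rw [if_neg (by omega)]
  show bisectLeftGo pvBreakpoints n (8 + 1) 6 8 = 8
  rw [bl_step _ _ _ _ _ (by norm_num)]
  norm_num [pvBreakpoints]
  rw [if_pos (by omega)]
  rw [bl_stop _ _ _ _ _ (by norm_num)]

lemma pvBl9 (n : Int) (h1 : (1000000:Int) < n) (h2 : n ≤ 5000000) : bisectLeft pvBreakpoints n 0 11 = 9 := by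
  unfold bisectLeft
  show bisectLeftGo pvBreakpoints n (10 + 1) 0 11 = 9
  rw [bl_step _ _ _ _ _ (by norm_num)]
  norm_num [pvBreakpoints]
  rw [if_pos (by omega)]
  show bisectLeftGo pvBreakpoints n (9 + 1) 6 11 = 9
  rw [bl_step _ _ _ _ _ (by norm_num)]
  norm_num [pvBreakpoints]
  rw [if_pos (by omega)]
  show bisectLeftGo pvBreakpoints n (8 + 1) 9 11 = 9
  rw [bl_step _ _ _ _ _ (by norm_num)]
  norm_num [pvBreakpoints]
  rw [if_neg (by omega)]
  show bisectLeftGo pvBreakpoints n (7 + 1) 9 10 = 9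
  rw [bl_step _ _ _ _ _ (by norm_num)]
  norm_num [pvBreakpoints]
  rw [if_neg (by omega)]
  rw [bl_stop _ _ _ _ _ (by norm_num)]

lemma pvBl10 (n : Int) (h1 : (5000000:Int) < n) (h2 : n ≤ 10000000) : bisectLeft pvBreakpoints n 0 11 = 10 := by
  unfold bisectLeft
  show bisectLeftGo pvBreakpoints n (10 + 1) 0 11 = 10
  rw [bl_step _ _ _ _ _ (by norm_num)]
  norm_num [pvBreakpoints]
  rw [if_pos (by omega)]
  show bisectLeftGo pvBreakpoints n (9 + 1) 6 11 = 10
  rw [bl_step _ _ _ _ _ (by norm_num)]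
  norm_num [pvBreakpoints]
  rw [if_pos (by omega)]
  show bisectLeftGo pvBreakpoints n (8 + 1) 9 11 = 10
  rw [bl_step _ _ _ _ _ (by norm_num)]
  norm_num [pvBreakpoints]
  rw [if_neg (by omega)]
  show bisectLeftGo pvBreakpoints n (7 + 1) 9 10 = 10
  rw [bl_step _ _ _ _ _ (by norm_num)]
  norm_num [pvBreakpoints]
  rw [if_pos (by omega)]
  rw [bl_stop _ _ _ _ _ (by norm_num)]

lemma pvBl11 (n : Int) (h1 : (10000000:Int) < n) : bisectLeft pvBreakpoints n 0 11 = 11 := by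
  unfold bisectLeft
  show bisectLeftGo pvBreakpoints n (10 + 1) 0 11 = 11
  rw [bl_step _ _ _ _ _ (by norm_num)]
  norm_num [pvBreakpoints]
  rw [if_pos (by omega)]
  show bisectLeftGo pvBreakpoints n (9 + 1) 6 11 = 11
  rw [bl_step _ _ _ _ _ (by norm_num)]
  norm_num [pvBreakpoints]
  rw [if_pos (by omega)]
  show bisectLeftGo pvBreakpoints n (8 + 1) 9 11 = 11
  rw [bl_step _ _ _ _ _ (by norm_num)]
  norm_num [pvBreakpoints]
  rw [if_pos (by omega)]
  rw [bl_stop _ _ _ _ _ (by norm_num)]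

lemma pvAlt0 (n : Int) (h1 : n ≤ 0) : special_ceil_alt n = 0 := by
  show (if bisectLeft pvBreakpoints n 0 pvBreakpoints.length = pvBreakpoints.length then pvBreakpoints.getLast!
        else pvBreakpoints.getD (bisectLeft pvBreakpoints n 0 pvBreakpoints.length) 0) = 0
  rw [show pvBreakpoints.length = 11 from rfl, pvBl0 n h1]
  decide

lemma pvAlt1 (n : Int) (h1 : (0:Int) < n) (h2 : n ≤ 100) : special_ceil_alt n = 100 := by
  show (if bisectLeft pvBreakpoints n 0 pvBreakpoints.length = pvBreakpoints.length then pvBreakpoints.getLast!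
        else pvBreakpoints.getD (bisectLeft pvBreakpoints n 0 pvBreakpoints.length) 0) = 100
  rw [show pvBreakpoints.length = 11 from rfl, pvBl1 n h1 h2]
  decide

lemma pvAlt2 (n : Int) (h1 : (100:Int) < n) (h2 : n ≤ 1000) : special_ceil_alt n = 1000 := by
  show (if bisectLeft pvBreakpoints n 0 pvBreakpoints.length = pvBreakpoints.length then pvBreakpoints.getLast!
        else pvBreakpoints.getD (bisectLeft pvBreakpoints n 0 pvBreakpoints.length) 0) = 1000
  rw [show pvBreakpoints.length = 11 from rfl, pvBl2 n h1 h2]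
  decide

lemma pvAlt3 (n : Int) (h1 : (1000:Int) < n) (h2 : n ≤ 5000) : special_ceil_alt n = 5000 := by
  show (if bisectLeft pvBreakpoints n 0 pvBreakpoints.length = pvBreakpoints.length then pvBreakpoints.getLast!
        else pvBreakpoints.getD (bisectLeft pvBreakpoints n 0 pvBreakpoints.length) 0) = 5000
  rw [show pvBreakpoints.length = 11 from rfl, pvBl3 n h1 h2]
  decide

lemma pvAlt4 (n : Int) (h1 : (5000:Int) < n) (h2 : n ≤ 10000) : special_ceil_alt n = 10000 := by
  show (if bisectLeft pvBreakpoints n 0 pvBreakpoints.length = pvBreakpoints.length then pvBreakpoints.getLast!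
        else pvBreakpoints.getD (bisectLeft pvBreakpoints n 0 pvBreakpoints.length) 0) = 10000
  rw [show pvBreakpoints.length = 11 from rfl, pvBl4 n h1 h2]
  decide

lemma pvAlt5 (n : Int) (h1 : (10000:Int) < n) (h2 : n ≤ 50000) : special_ceil_alt n = 50000 := by
  show (if bisectLeft pvBreakpoints n 0 pvBreakpoints.length = pvBreakpoints.length then pvBreakpoints.getLast!
        else pvBreakpoints.getD (bisectLeft pvBreakpoints n 0 pvBreakpoints.length) 0) = 50000
  rw [show pvBreakpoints.length = 11 from rfl, pvBl5 n h1 h2]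
  decide

lemma pvAlt6 (n : Int) (h1 : (50000:Int) < n) (h2 : n ≤ 100000) : special_ceil_alt n = 100000 := by
  show (if bisectLeft pvBreakpoints n 0 pvBreakpoints.length = pvBreakpoints.length then pvBreakpoints.getLast!
        else pvBreakpoints.getD (bisectLeft pvBreakpoints n 0 pvBreakpoints.length) 0) = 100000
  rw [show pvBreakpoints.length = 11 from rfl, pvBl6 n h1 h2]
  decide

lemma pvAlt7 (n : Int) (h1 : (100000:Int) < n) (h2 : n ≤ 500000) : special_ceil_alt n = 500000 := by
  show (if bisectLeft pvBreakpoints n 0 pvBreakpoints.length = pvBreakpoints.length then pvBreakpoints.getLast!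
        else pvBreakpoints.getD (bisectLeft pvBreakpoints n 0 pvBreakpoints.length) 0) = 500000
  rw [show pvBreakpoints.length = 11 from rfl, pvBl7 n h1 h2]
  decide

lemma pvAlt8 (n : Int) (h1 : (500000:Int) < n) (h2 : n ≤ 1000000) : special_ceil_alt n = 1000000 := by
  show (if bisectLeft pvBreakpoints n 0 pvBreakpoints.length = pvBreakpoints.length then pvBreakpoints.getLast!
        else pvBreakpoints.getD (bisectLeft pvBreakpoints n 0 pvBreakpoints.length) 0) = 1000000
  rw [show pvBreakpoints.length = 11 from rfl, pvBl8 n h1 h2]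
  decide

lemma pvAlt9 (n : Int) (h1 : (1000000:Int) < n) (h2 : n ≤ 5000000) : special_ceil_alt n = 5000000 := by
  show (if bisectLeft pvBreakpoints n 0 pvBreakpoints.length = pvBreakpoints.length then pvBreakpoints.getLast!
        else pvBreakpoints.getD (bisectLeft pvBreakpoints n 0 pvBreakpoints.length) 0) = 5000000
  rw [show pvBreakpoints.length = 11 from rfl, pvBl9 n h1 h2]
  decide

lemma pvAlt10 (n : Int) (h1 : (5000000:Int) < n) (h2 : n ≤ 10000000) : special_ceil_alt n = 10000000 := by
  show (if bisectLeft pvBreakpoints n 0 pvBreakpoints.length = pvBreakpoints.length then pvBreakpoints.getLast!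
        else pvBreakpoints.getD (bisectLeft pvBreakpoints n 0 pvBreakpoints.length) 0) = 10000000
  rw [show pvBreakpoints.length = 11 from rfl, pvBl10 n h1 h2]
  decide

lemma pvAlt11 (n : Int) (h1 : (10000000:Int) < n) : special_ceil_alt n = 10000000 := by
  show (if bisectLeft pvBreakpoints n 0 pvBreakpoints.length = pvBreakpoints.length then pvBreakpoints.getLast!
        else pvBreakpoints.getD (bisectLeft pvBreakpoints n 0 pvBreakpoints.length) 0) = 10000000
  rw [show pvBreakpoints.length = 11 from rfl, pvBl11 n h1]
  decide


lemma scan_hit (n bp : Int) (rest : List Int) (h : n ≤ bp) : scanLoopA n (bp :: rest) = some bp := by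
  rw [scanLoopA]
  rcases eq_or_lt_of_le h with h' | h'
  · rw [if_pos h']
  · rw [if_neg (by omega), if_pos h']

lemma scan_skip (n bp : Int) (rest : List Int) (h : bp < n) : scanLoopA n (bp :: rest) = scanLoopA n rest := by
  rw [scanLoopA, if_neg (by omega), if_neg (by omega)]

lemma pvA0 (n : Int) (h1 : n ≤ 0) : special_ceil n = 0 := by
  show (if n ≤ 0 then (0:Int) else match scanLoopA n [0, 100, 1000, 5000, 10000, 50000, 100000, 500000, 1000000, 5000000, 10000000] with | some bp => bp | none => 10000000) = 0
  rw [if_pos h1]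

lemma pvA1 (n : Int) (h1 : (0:Int) < n) (h2 : n ≤ 100) : special_ceil n = 100 := by
  show (if n ≤ 0 then (0:Int) else match scanLoopA n [0, 100, 1000, 5000, 10000, 50000, 100000, 500000, 1000000, 5000000, 10000000] with | some bp => bp | none => 10000000) = 100
  rw [if_neg (by omega)]
  rw [scan_skip _ _ _ (by omega)]
  rw [scan_hit _ _ _ (by omega)]

lemma pvA2 (n : Int) (h1 : (100:Int) < n) (h2 : n ≤ 1000) : special_ceil n = 1000 := by
  show (if n ≤ 0 then (0:Int) else match scanLoopA n [0, 100, 1000, 5000, 10000, 50000, 100000, 500000, 1000000, 5000000, 10000000] with | some bp => bp | none => 10000000) = 1000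
  rw [if_neg (by omega)]
  rw [scan_skip _ _ _ (by omega)]
  rw [scan_skip _ _ _ (by omega)]
  rw [scan_hit _ _ _ (by omega)]

lemma pvA3 (n : Int) (h1 : (1000:Int) < n) (h2 : n ≤ 5000) : special_ceil n = 5000 := by
  show (if n ≤ 0 then (0:Int) else match scanLoopA n [0, 100, 1000, 5000, 10000, 50000, 100000, 500000, 1000000, 5000000, 10000000] with | some bp => bp | none => 10000000) = 5000
  rw [if_neg (by omega)]
  rw [scan_skip _ _ _ (by omega)]
  rw [scan_skip _ _ _ (by omega)]
  rw [scan_skip _ _ _ (by omega)]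
  rw [scan_hit _ _ _ (by omega)]

lemma pvA4 (n : Int) (h1 : (5000:Int) < n) (h2 : n ≤ 10000) : special_ceil n = 10000 := by
  show (if n ≤ 0 then (0:Int) else match scanLoopA n [0, 100, 1000, 5000, 10000, 50000, 100000, 500000, 1000000, 5000000, 10000000] with | some bp => bp | none => 10000000) = 10000
  rw [if_neg (by omega)]
  rw [scan_skip _ _ _ (by omega)]
  rw [scan_skip _ _ _ (by omega)]
  rw [scan_skip _ _ _ (by omega)]
  rw [scan_skip _ _ _ (by omega)]
  rw [scan_hit _ _ _ (by omega)]

lemma pvA5 (n : Int) (h1 : (10000:Int) < n) (h2 : n ≤ 50000) : special_ceil n = 50000 := by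
  show (if n ≤ 0 then (0:Int) else match scanLoopA n [0, 100, 1000, 5000, 10000, 50000, 100000, 500000, 1000000, 5000000, 10000000] with | some bp => bp | none => 10000000) = 50000
  rw [if_neg (by omega)]
  rw [scan_skip _ _ _ (by omega)]
  rw [scan_skip _ _ _ (by omega)]
  rw [scan_skip _ _ _ (by omega)]
  rw [scan_skip _ _ _ (by omega)]
  rw [scan_skip _ _ _ (by omega)]
  rw [scan_hit _ _ _ (by omega)]

lemma pvA6 (n : Int) (h1 : (50000:Int) < n) (h2 : n ≤ 100000) : special_ceil n = 100000 := by
  show (if n ≤ 0 then (0:Int) else match scanLoopA n [0, 100, 1000, 5000, 10000, 50000, 100000, 500000, 1000000, 5000000, 10000000] with | some bp => bp | none => 10000000) = 100000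
  rw [if_neg (by omega)]
  rw [scan_skip _ _ _ (by omega)]
  rw [scan_skip _ _ _ (by omega)]
  rw [scan_skip _ _ _ (by omega)]
  rw [scan_skip _ _ _ (by omega)]
  rw [scan_skip _ _ _ (by omega)]
  rw [scan_skip _ _ _ (by omega)]
  rw [scan_hit _ _ _ (by omega)]

lemma pvA7 (n : Int) (h1 : (100000:Int) < n) (h2 : n ≤ 500000) : special_ceil n = 500000 := by
  show (if n ≤ 0 then (0:Int) else match scanLoopA n [0, 100, 1000, 5000, 10000, 50000, 100000, 500000, 1000000, 5000000, 10000000] with | some bp => bp | none => 10000000) = 500000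
  rw [if_neg (by omega)]
  rw [scan_skip _ _ _ (by omega)]
  rw [scan_skip _ _ _ (by omega)]
  rw [scan_skip _ _ _ (by omega)]
  rw [scan_skip _ _ _ (by omega)]
  rw [scan_skip _ _ _ (by omega)]
  rw [scan_skip _ _ _ (by omega)]
  rw [scan_skip _ _ _ (by omega)]
  rw [scan_hit _ _ _ (by omega)]

lemma pvA8 (n : Int) (h1 : (500000:Int) < n) (h2 : n ≤ 1000000) : special_ceil n = 1000000 := by
  show (if n ≤ 0 then (0:Int) else match scanLoopA n [0, 100, 1000, 5000, 10000, 50000, 100000, 500000, 1000000, 5000000, 10000000] with | some bp => bp | none => 10000000) = 1000000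
  rw [if_neg (by omega)]
  rw [scan_skip _ _ _ (by omega)]
  rw [scan_skip _ _ _ (by omega)]
  rw [scan_skip _ _ _ (by omega)]
  rw [scan_skip _ _ _ (by omega)]
  rw [scan_skip _ _ _ (by omega)]
  rw [scan_skip _ _ _ (by omega)]
  rw [scan_skip _ _ _ (by omega)]
  rw [scan_skip _ _ _ (by omega)]
  rw [scan_hit _ _ _ (by omega)]

lemma pvA9 (n : Int) (h1 : (1000000:Int) < n) (h2 : n ≤ 5000000) : special_ceil n = 5000000 := by
  show (if n ≤ 0 then (0:Int) else match scanLoopA n [0, 100, 1000, 5000, 10000, 50000, 100000, 500000, 1000000, 5000000, 10000000] with | some bp => bp | none => 10000000) = 5000000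
  rw [if_neg (by omega)]
  rw [scan_skip _ _ _ (by omega)]
  rw [scan_skip _ _ _ (by omega)]
  rw [scan_skip _ _ _ (by omega)]
  rw [scan_skip _ _ _ (by omega)]
  rw [scan_skip _ _ _ (by omega)]
  rw [scan_skip _ _ _ (by omega)]
  rw [scan_skip _ _ _ (by omega)]
  rw [scan_skip _ _ _ (by omega)]
  rw [scan_skip _ _ _ (by omega)]
  rw [scan_hit _ _ _ (by omega)]

lemma pvA10 (n : Int) (h1 : (5000000:Int) < n) (h2 : n ≤ 10000000) : special_ceil n = 10000000 := by
  show (if n ≤ 0 then (0:Int) else match scanLoopA n [0, 100, 1000, 5000, 10000, 50000, 100000, 500000, 1000000, 5000000, 10000000] with | some bp => bp | none => 10000000) = 10000000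
  rw [if_neg (by omega)]
  rw [scan_skip _ _ _ (by omega)]
  rw [scan_skip _ _ _ (by omega)]
  rw [scan_skip _ _ _ (by omega)]
  rw [scan_skip _ _ _ (by omega)]
  rw [scan_skip _ _ _ (by omega)]
  rw [scan_skip _ _ _ (by omega)]
  rw [scan_skip _ _ _ (by omega)]
  rw [scan_skip _ _ _ (by omega)]
  rw [scan_skip _ _ _ (by omega)]
  rw [scan_skip _ _ _ (by omega)]
  rw [scan_hit _ _ _ (by omega)]

lemma pvA11 (n : Int) (h1 : (10000000:Int) < n) : special_ceil n = 10000000 := by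
  show (if n ≤ 0 then (0:Int) else match scanLoopA n [0, 100, 1000, 5000, 10000, 50000, 100000, 500000, 1000000, 5000000, 10000000] with | some bp => bp | none => 10000000) = 10000000
  rw [if_neg (by omega)]
  rw [scan_skip _ _ _ (by omega)]
  rw [scan_skip _ _ _ (by omega)]
  rw [scan_skip _ _ _ (by omega)]
  rw [scan_skip _ _ _ (by omega)]
  rw [scan_skip _ _ _ (by omega)]
  rw [scan_skip _ _ _ (by omega)]
  rw [scan_skip _ _ _ (by omega)]
  rw [scan_skip _ _ _ (by omega)]
  rw [scan_skip _ _ _ (by omega)]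
  rw [scan_skip _ _ _ (by omega)]
  rw [scan_skip _ _ _ (by omega)]
  rfl

-- ===== VERDICT (by name: the statement is the Claim_ definition above) =====
theorem special_ceil_spec : Claim_equal_special_ceil := by
  intro n _
  unfold Spec_special_ceil
  by_cases h0 : n ≤ 0
  · rw [pvA0 n h0, pvAlt0 n h0]
  by_cases h1 : n ≤ 100
  · rw [pvA1 n (by omega) h1, pvAlt1 n (by omega) h1]
  by_cases h2 : n ≤ 1000
  · rw [pvA2 n (by omega) h2, pvAlt2 n (by omega) h2]
  by_cases h3 : n ≤ 5000
  · rw [pvA3 n (by omega) h3, pvAlt3 n (by omega) h3]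
  by_cases h4 : n ≤ 10000
  · rw [pvA4 n (by omega) h4, pvAlt4 n (by omega) h4]
  by_cases h5 : n ≤ 50000
  · rw [pvA5 n (by omega) h5, pvAlt5 n (by omega) h5]
  by_cases h6 : n ≤ 100000
  · rw [pvA6 n (by omega) h6, pvAlt6 n (by omega) h6]
  by_cases h7 : n ≤ 500000
  · rw [pvA7 n (by omega) h7, pvAlt7 n (by omega) h7]
  by_cases h8 : n ≤ 1000000
  · rw [pvA8 n (by omega) h8, pvAlt8 n (by omega) h8]
  by_cases h9 : n ≤ 5000000
  · rw [pvA9 n (by omega) h9, pvAlt9 n (by omega) h9]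
  by_cases h10 : n ≤ 10000000
  · rw [pvA10 n (by omega) h10, pvAlt10 n (by omega) h10]
  rw [pvA11 n (by omega), pvAlt11 n (by omega)]
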